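-- pv_equiv track=rewrite | github.com/Chobochoi/Codingtest | 백준/Silver/2644. 촌수계산/촌수계산.py | dfs
-- ===== SOURCE A (Python) =====
-- def dfs(here, depth, target, graph, visited):
--     """
--     DFS를 사용한 촌수 계산 함수
--
--     Parameters:
--     - here: 현재 위치한 사람의 번호
--     - depth: 현재까지의 깊이(촌수)
--     - target: 찾고자 하는 목표 사람의 번호
--     - graph: 인접리스트로 표현된 가족관계 그래프
--     - visited: 방문 체크 배열
--
--     Returns:
--     - 목표에 도달했다면 촌수, 도달하지 못했다면 -1
--     """
--     # 현재 사람을 방문했다고 표시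
--     # C++의 visited[here] = true;와 동일
--     visited[here] = True
--
--     # 목표 사람에 도달했다면 현재 깊이(촌수)를 반환
--     # C++의 if (here == endPoint) 부분
--     if here == target:
--         return depth
--
--     # 현재 사람과 연결된 모든 사람들을 확인
--     # C++의 for (int i : vec[here])와 동일
--     for next_person in graph[here]:
--         # 아직 방문하지 않은 사람이라면
--         if not visited[next_person]:
--             # 재귀적으로 DFS 호출하여 결과 확인
--             # depth + 1로 촌수 증가
--             result = dfs(next_person, depth + 1, target, graph, visited)
--
--             # 목표에 도달했다면 결과 반환
--             # C++의 if (dfs(i, depth + 1, result)) return true; 부분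
--             if result != -1:
--                 return result
--
--     # 모든 경로를 탐색해도 목표에 도달하지 못했다면 -1 반환
--     # C++의 return false; 부분
--     return -1
-- ===== SOURCE B (Python) =====
-- def dfs(here, depth, target, graph, visited):
--     # Iterative DFS with an explicit stack of (node, depth) pairs instead of recursion.
--     # Like A, it mutates `visited`; the equivalence claimed is about the return value.
--     visited[here] = True
--     if here == target:
--         return depth
--     stack = [(n, depth + 1) for n in reversed(graph[here])]
--     while stack:
--         node, d = stack.pop()
--         if visited[node]:
--             continue
--         visited[node] = True
--         if node == target:
--             return d
--         stack.extend((n, d + 1) for n in reversed(graph[node]))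
--     return -1
-- ===== Notes on version B (the rewrite author's own statement) =====
-- stated objective: alternative
-- what changed: The recursive pre-order DFS with an early return is replaced by an iterative loop over an explicit stack of (node, depth) pairs (children pushed in reverse, visited re-checked at pop time), removing recursion entirely.
-- outside the precondition, e.g. on dfs(0, 0, 1, [[1, 9], []], [False, False]): A returns 1, B returns 1; on dfs(0, 0, 1, [[1, 9]], [False, False]): A returns 1, B returns 1
import Mathlib
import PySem

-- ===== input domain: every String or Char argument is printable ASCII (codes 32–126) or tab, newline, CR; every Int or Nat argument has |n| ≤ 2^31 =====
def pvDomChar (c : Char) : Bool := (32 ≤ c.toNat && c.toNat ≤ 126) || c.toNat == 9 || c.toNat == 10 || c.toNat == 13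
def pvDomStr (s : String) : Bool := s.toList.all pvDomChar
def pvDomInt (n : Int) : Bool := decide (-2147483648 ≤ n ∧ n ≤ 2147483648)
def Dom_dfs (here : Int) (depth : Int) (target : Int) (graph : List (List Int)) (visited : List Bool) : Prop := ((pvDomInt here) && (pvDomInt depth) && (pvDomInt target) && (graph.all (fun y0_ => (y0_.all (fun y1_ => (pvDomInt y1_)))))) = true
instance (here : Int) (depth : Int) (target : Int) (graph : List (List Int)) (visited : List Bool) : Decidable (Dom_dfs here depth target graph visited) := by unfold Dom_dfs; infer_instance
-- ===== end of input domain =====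

-- B replaces the recursive pre-order DFS by an iterative loop over an explicit stack of
-- (node, depth) pairs (objective: alternative decomposition, same cost).  Both Pythons mutate
-- `visited` in place; the equivalence proved here is about the RETURN value only.

-- ===== PORT A =====
-- shared primitives for Python expressions both sources contain:
-- 'visited[i] = True' (exact, incl. negative wrap; the IndexError case is excluded by Pre_)
def setTrue (v : List Bool) (i : Int) : List Bool := PySem.List.pySetD v i true
-- 'visited[i]' as a Bool test ('True' default only where Python raises IndexError, excluded by Pre_)
def isVisited (v : List Bool) (i : Int) : Bool := (PySem.List.pyGet? v i).getD true
-- 'graph[i]' ('[]' default only where Python raises IndexError, excluded by Pre_)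
def rowOf (graph : List (List Int)) (i : Int) : List Int := (PySem.List.pyGet? graph i).getD []

-- The next three lemmas are cited by the termination proof of `dfsAltLoop` below.
theorem pyIdx?_of_isVisited_false (v : List Bool) (i : Int) (h : isVisited v i = false) :
    ∃ k, PySem.List.pyIdx? v.length i = some k ∧ k < v.length ∧ v[k]? = some false ∧
      setTrue v i = v.set k true := by
  unfold isVisited PySem.List.pyGet? at h
  rcases hk : PySem.List.pyIdx? v.length i with _ | k
  · simp [hk] at h
  · have hklt : k < v.length := by
      unfold PySem.List.pyIdx? at hk
      split_ifs at hk <;> simp_all <;> omega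
    refine ⟨k, rfl, hklt, ?_, ?_⟩
    · simp only [hk, Option.bind_some, List.getElem?_eq_getElem hklt, Option.getD_some] at h
      simp [List.getElem?_eq_getElem hklt, h]
    · unfold setTrue PySem.List.pySetD PySem.List.pySet?
      simp [hk]

theorem count_false_set_true (v : List Bool) (k : Nat) (hk : k < v.length) (hvk : v[k] = false) :
    (v.set k true).count false < v.count false := by
  induction v generalizing k with
  | nil => simp at hk
  | cons a t ih =>
    cases k with
    | zero => simp_all
    | succ k' =>
      simp only [List.set_cons_succ, List.count_cons]
      have := ih k' (by simpa using hk) (by simpa using hvk)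
      omega

theorem count_setTrue_lt (v : List Bool) (i : Int) (h : isVisited v i = false) :
    (setTrue v i).count false < v.count false := by
  obtain ⟨k, _, hklt, hvk, hset⟩ := pyIdx?_of_isVisited_false v i h
  rw [hset]
  refine count_false_set_true v k hklt ?_
  simpa [List.getElem?_eq_getElem hklt] using hvk

-- === the recursive DFS of A, fueled, threading the mutated `visited` through ===
-- (the fuel, `visited.length + 1` from the wrapper `dfs`, is a totality guard only: one unit
-- is consumed per recursion level and every level below the top flips one False cell to True,
-- so the fuel-0 branch is never reached — the equivalence theorem below proves this implicitly,
-- since the un-fueled `dfs_alt` agrees with it)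
mutual
def dfsAux (target : Int) (graph : List (List Int)) (fuel : Nat) (here depth : Int)
    (v : List Bool) : Int × List Bool :=
  match fuel with
  | 0 => (-1, v)
  | fuel' + 1 =>
    let v1 := setTrue v here                 -- visited[here] = True
    if here = target then (depth, v1)        -- if here == target: return depth
    else dfsLoop target graph fuel' (rowOf graph here) depth v1
termination_by (fuel, 0)

def dfsLoop (target : Int) (graph : List (List Int)) (fuel : Nat) (ns : List Int)
    (depth : Int) (v : List Bool) : Int × List Bool :=
  match ns with
  | [] => (-1, v)                            -- return -1
  | n :: rest =>
    if isVisited v n = false then            -- if not visited[next_person]: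
      let q := dfsAux target graph fuel n (depth + 1) v
      if q.1 ≠ -1 then q else dfsLoop target graph fuel rest depth q.2
    else dfsLoop target graph fuel rest depth v
termination_by (fuel, ns.length + 1)
end

def dfs (here : Int) (depth : Int) (target : Int) (graph : List (List Int)) (visited : List Bool) : Int :=
  (dfsAux target graph (visited.length + 1) here depth visited).1

-- ===== PORT B =====
-- Python's end-of-list stack (pop from the end, children pushed reversed) is modelled as a
-- head-of-list stack (pop the head, children prepended in order) — the identical pop order.
def dfsAltLoop (target : Int) (graph : List (List Int)) (stack : List (Int × Int))
    (v : List Bool) : Int × List Bool :=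
  match stack with
  | [] => (-1, v)                                     -- return -1
  | (node, d) :: rest =>
    if isVisited v node = false then
      let v1 := setTrue v node                        -- visited[node] = True
      if node = target then (d, v1)                   -- if node == target: return d
      else dfsAltLoop target graph
        ((rowOf graph node).map (fun n => (n, d + 1)) ++ rest) v1
    else dfsAltLoop target graph rest v               -- if visited[node]: continue
termination_by (v.count false, stack.length)
decreasing_by
  · exact Prod.Lex.left _ _ (count_setTrue_lt v node (by assumption))
  · exact Prod.Lex.right _ (by simp)

def dfs_alt (here : Int) (depth : Int) (target : Int) (graph : List (List Int)) (visited : List Bool) : Int :=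
  let v1 := setTrue visited here                      -- visited[here] = True
  if here = target then depth                         -- if here == target: return depth
  else (dfsAltLoop target graph ((rowOf graph here).map (fun n => (n, depth + 1))) v1).1

-- ===== PRECONDITION & SPEC =====
-- one closure step: from every collected node that is not the target, collect the entries of
-- its row whose visited-cell is Python-valid and initially False (the only nodes A can recurse into)
def pvReachStep (target : Int) (graph : List (List Int)) (visited : List Bool) (E : List Int) : List Int :=
  E.foldl (fun acc x =>
    if x = target then acc
    else acc ++ ((PySem.List.pyGet? graph x).getD []).filter
      (fun y => !acc.contains y && ((PySem.List.pyGet? visited y).getD true == false))) E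

def pvReach (target : Int) (graph : List (List Int)) (visited : List Bool) : Nat → List Int → List Int
  | 0, E => E
  | n + 1, E => pvReach target graph visited n (pvReachStep target graph visited E)

-- Pre_ admits an input when every node A can possibly reach from `here` (passing only through
-- initially-unvisited cells and never expanding the target, whose row A never reads) is a
-- Python-valid index — negative wraparound included — into `visited`, and into `graph` with
-- visited-testable row entries where the node's row is read.  Outside Pre_ A raises IndexError
-- on such an index, except when the dynamic traversal happens to cut the bad index off by
-- finding the target first (A returns there; see the cites).
def Pre_dfs (here : Int) (depth : Int) (target : Int) (graph : List (List Int)) (visited : List Bool) : Prop :=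
  PySem.Raise.InRange visited.length here ∧
  ∀ x ∈ pvReach target graph visited ((graph.flatMap (fun r => r)).length + 1) [here],
    PySem.Raise.InRange visited.length x ∧
    (x ≠ target → PySem.Raise.InRange graph.length x ∧
      ∀ y ∈ (PySem.List.pyGet? graph x).getD [], PySem.Raise.InRange visited.length y)
instance (here : Int) (depth : Int) (target : Int) (graph : List (List Int)) (visited : List Bool) : Decidable (Pre_dfs here depth target graph visited) := by unfold Pre_dfs; infer_instance

def pvWitness_dfs : Int × Int × Int × List (List Int) × List Bool :=
  (0, 0, 1, [[1], [0]], [false, false])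

def Spec_dfs (here : Int) (depth : Int) (target : Int) (graph : List (List Int)) (visited : List Bool) (out : Int) : Prop := out = dfs_alt here depth target graph visited
instance (here : Int) (depth : Int) (target : Int) (graph : List (List Int)) (visited : List Bool) (out : Int) : Decidable (Spec_dfs here depth target graph visited out) := by unfold Spec_dfs; infer_instance

-- ===== CLAIM (what is proved, stated in full; the proofs are below) =====
def Claim_equal_dfs : Prop := ∀ (here : Int) (depth : Int) (target : Int) (graph : List (List Int)) (visited : List Bool), Dom_dfs here depth target graph visited → Pre_dfs here depth target graph visited → Spec_dfs here depth target graph visited (dfs here depth target graph visited)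

-- ===== LEMMAS AND PROOFS =====

-- basic facts about the shared primitives
theorem count_setTrue_le (v : List Bool) (i : Int) :
    (setTrue v i).count false ≤ v.count false := by
  have base : ∀ (w : List Bool) (k : Nat), (w.set k true).count false ≤ w.count false := by
    intro w k
    induction w generalizing k with
    | nil => simp
    | cons a tl ih =>
      cases k with
      | zero => cases a <;> simp
      | succ k' =>
        simp only [List.set_cons_succ, List.count_cons]
        have := ih k'
        omega
  unfold setTrue PySem.List.pySetD PySem.List.pySet?
  rcases hk : PySem.List.pyIdx? v.length i with _ | k
  · simp
  · simp only [Option.map_some, Option.getD_some]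
    exact base v k

theorem length_setTrue (v : List Bool) (i : Int) : (setTrue v i).length = v.length := by
  unfold setTrue PySem.List.pySetD PySem.List.pySet?
  rcases hk : PySem.List.pyIdx? v.length i with _ | k <;> simp

theorem isVisited_setTrue_self (v : List Bool) (i : Int) (h : isVisited v i = false) :
    isVisited (setTrue v i) i = true := by
  obtain ⟨k, hk, hklt, _, hset⟩ := pyIdx?_of_isVisited_false v i h
  rw [hset]
  unfold isVisited PySem.List.pyGet?
  have hlen : (v.set k true).length = v.length := by simp
  rw [hlen, hk]
  simp [hklt]

theorem isVisited_setTrue_mono (v : List Bool) (i t : Int) (h : isVisited v t = true) :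
    isVisited (setTrue v i) t = true := by
  unfold isVisited PySem.List.pyGet? at *
  rw [length_setTrue]
  rcases ht : PySem.List.pyIdx? v.length t with _ | j
  · simp
  · rw [ht] at h
    simp only [Option.bind_some] at h ⊢
    unfold setTrue PySem.List.pySetD PySem.List.pySet?
    rcases hk : PySem.List.pyIdx? v.length i with _ | k
    · simpa using h
    · simp only [Option.map_some, Option.getD_some]
      by_cases hkj : k = j
      · subst hkj
        have hklt : k < v.length := by
          unfold PySem.List.pyIdx? at hk
          split_ifs at hk <;> simp_all <;> omega
        simp [hklt]
      · rw [List.getElem?_set_ne hkj]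
        exact h

-- the invariants of A's recursion: it never increases the number of unvisited cells, it
-- preserves "target is visited", and once the target is visited it can only return -1
def MA (t : Int) (g : List (List Int)) (fuel : Nat) : Prop :=
  ∀ (here d : Int) (v : List Bool),
    (dfsAux t g fuel here d v).2.count false ≤ v.count false ∧
    (isVisited v t = true → isVisited (dfsAux t g fuel here d v).2 t = true ∧
      (isVisited v here = false → (dfsAux t g fuel here d v).1 = -1))

def ML (t : Int) (g : List (List Int)) (fuel : Nat) : Prop :=
  ∀ (ns : List Int) (d : Int) (v : List Bool),
    (dfsLoop t g fuel ns d v).2.count false ≤ v.count false ∧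
    (isVisited v t = true → isVisited (dfsLoop t g fuel ns d v).2 t = true ∧
      (dfsLoop t g fuel ns d v).1 = -1)

theorem ma_zero (t : Int) (g : List (List Int)) : MA t g 0 := by
  intro here d v
  simp [dfsAux]

theorem ml_of_ma (t : Int) (g : List (List Int)) (fuel : Nat) (hma : MA t g fuel) :
    ML t g fuel := by
  intro ns d
  induction ns with
  | nil => intro v; simp [dfsLoop]
  | cons n rest ih =>
    intro v
    rw [dfsLoop]
    by_cases hv : isVisited v n = false
    · rw [if_pos hv]
      obtain ⟨hc, htv⟩ := hma n (d + 1) v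
      by_cases hq : (dfsAux t g fuel n (d + 1) v).1 ≠ -1
      · rw [if_pos hq]
        refine ⟨hc, fun ht => ?_⟩
        exact absurd ((htv ht).2 hv) hq
      · rw [if_neg hq]
        obtain ⟨hc', htv'⟩ := ih (dfsAux t g fuel n (d + 1) v).2
        refine ⟨le_trans hc' hc, fun ht => htv' ((htv ht).1)⟩
    · rw [if_neg hv]
      exact ih v

theorem ma_succ (t : Int) (g : List (List Int)) (fuel : Nat) (hml : ML t g fuel) :
    MA t g (fuel + 1) := by
  intro here d v
  rw [dfsAux]
  by_cases ht : here = t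
  · simp only [ht, if_true]
    refine ⟨count_setTrue_le v t, fun htv => ⟨isVisited_setTrue_mono v t t htv, fun hv => ?_⟩⟩
    exact absurd htv (by simp [hv])
  · simp only [ht, if_false]
    obtain ⟨hc, htv⟩ := hml (rowOf g here) d (setTrue v here)
    refine ⟨le_trans hc (count_setTrue_le v here), fun h => ?_⟩
    obtain ⟨h1, h2⟩ := htv (isVisited_setTrue_mono v here t h)
    exact ⟨h1, fun _ => h2⟩

theorem ma_all (t : Int) (g : List (List Int)) : ∀ fuel, MA t g fuel ∧ ML t g fuel := by
  intro fuel
  induction fuel with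
  | zero => exact ⟨ma_zero t g, ml_of_ma t g 0 (ma_zero t g)⟩
  | succ f ih =>
    have hma := ma_succ t g f ih.2
    exact ⟨hma, ml_of_ma t g (f + 1) hma⟩

-- the simulation statements: the stack machine of B run from a stack whose top segment is A's
-- pending work agrees with A's recursion, in one of three shapes (found; exhausted with the
-- same visited state; or A swallowed a find of -1, after which both sides can only report -1)
def SA (t : Int) (g : List (List Int)) (fuel : Nat) : Prop :=
  ∀ (here d : Int) (rest : List (Int × Int)) (v : List Bool),
    isVisited v here = false →
    (setTrue v here).count false + 1 ≤ fuel →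
    ((dfsAux t g fuel here d v).1 ≠ -1 ∧
      dfsAltLoop t g ((here, d) :: rest) v = dfsAux t g fuel here d v) ∨
    ((dfsAux t g fuel here d v).1 = -1 ∧
      dfsAltLoop t g ((here, d) :: rest) v = dfsAltLoop t g rest (dfsAux t g fuel here d v).2) ∨
    ((dfsAux t g fuel here d v).1 = -1 ∧ isVisited (dfsAux t g fuel here d v).2 t = true ∧
      (dfsAltLoop t g ((here, d) :: rest) v).1 = -1)

def SL (t : Int) (g : List (List Int)) (fuel : Nat) : Prop :=
  ∀ (ns : List Int) (d : Int) (rest : List (Int × Int)) (v : List Bool),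
    v.count false ≤ fuel →
    ((dfsLoop t g fuel ns d v).1 ≠ -1 ∧
      dfsAltLoop t g (ns.map (fun n => (n, d + 1)) ++ rest) v = dfsLoop t g fuel ns d v) ∨
    ((dfsLoop t g fuel ns d v).1 = -1 ∧
      dfsAltLoop t g (ns.map (fun n => (n, d + 1)) ++ rest) v =
        dfsAltLoop t g rest (dfsLoop t g fuel ns d v).2) ∨
    ((dfsLoop t g fuel ns d v).1 = -1 ∧ isVisited (dfsLoop t g fuel ns d v).2 t = true ∧
      (dfsAltLoop t g (ns.map (fun n => (n, d + 1)) ++ rest) v).1 = -1)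

theorem sa_zero (t : Int) (g : List (List Int)) : SA t g 0 := by
  intro here d rest v _ hf
  omega

theorem sl_of_sa (t : Int) (g : List (List Int)) (fuel : Nat) (hsa : SA t g fuel) :
    SL t g fuel := by
  intro ns d rest
  induction ns with
  | nil =>
    intro v _
    exact Or.inr (Or.inl ⟨by simp [dfsLoop], by simp [dfsLoop]⟩)
  | cons n rest' ih =>
    intro v hf
    rw [dfsLoop]
    simp only [List.map_cons, List.cons_append]
    by_cases hv : isVisited v n = false
    · rw [if_pos hv]
      have hlt := count_setTrue_lt v n hv
      rcases hsa n (d + 1) (rest'.map (fun m => (m, d + 1)) ++ rest) v hv (by omega) with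
        ⟨hq, hB⟩ | ⟨hq, hB⟩ | ⟨hq, htv, hB⟩
      · rw [if_pos hq]
        exact Or.inl ⟨hq, hB⟩
      · -- A swallows the -1 and continues on the sibling list with the updated state
        rw [if_neg (by simp [hq])]
        have hcq : (dfsAux t g fuel n (d + 1) v).2.count false ≤ v.count false :=
          ((ma_all t g fuel).1 n (d + 1) v).1
        rcases ih (dfsAux t g fuel n (d + 1) v).2 (by omega) with
          ⟨hp, hB'⟩ | ⟨hp, hB'⟩ | ⟨hp, htv', hB'⟩
      -- the three shapes carry over, composing the two stack-machine equations
        · exact Or.inl ⟨hp, by rw [hB, hB']⟩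
        · exact Or.inr (Or.inl ⟨hp, by rw [hB, hB']⟩)
        · exact Or.inr (Or.inr ⟨hp, htv', by rw [hB]; exact hB'⟩)
      · -- A found the target at depth -1: from now on both sides can only answer -1
        rw [if_neg (by simp [hq])]
        obtain ⟨hp2, hp1⟩ :=
          ((ma_all t g fuel).2 (rest') d (dfsAux t g fuel n (d + 1) v).2).2 htv
        exact Or.inr (Or.inr ⟨hp1, hp2, hB⟩)
    · rw [if_neg hv]
      have hv' : isVisited v n = true := by simpa using hv
      have hstep : dfsAltLoop t g ((n, d + 1) :: (rest'.map (fun m => (m, d + 1)) ++ rest)) v =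
          dfsAltLoop t g (rest'.map (fun m => (m, d + 1)) ++ rest) v := by
        rw [dfsAltLoop]
        simp [hv']
      rcases ih v hf with ⟨hp, hB⟩ | ⟨hp, hB⟩ | ⟨hp, htv, hB⟩
      · exact Or.inl ⟨hp, by rw [hstep, hB]⟩
      · exact Or.inr (Or.inl ⟨hp, by rw [hstep, hB]⟩)
      · exact Or.inr (Or.inr ⟨hp, htv, by rw [hstep]; exact hB⟩)

theorem sa_succ (t : Int) (g : List (List Int)) (fuel : Nat) (hsl : SL t g fuel) :
    SA t g (fuel + 1) := by
  intro here d rest v hv hf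
  rw [dfsAux, dfsAltLoop]
  rw [if_pos hv]
  by_cases ht : here = t
  · simp only [ht, if_true]
    by_cases hd : d = -1
    · refine Or.inr (Or.inr ⟨hd, ?_, hd⟩)
      rw [← ht]
      exact isVisited_setTrue_self v here hv
    · exact Or.inl ⟨hd, by simp⟩
  · simp only [ht, if_false]
    exact hsl (rowOf g here) d rest (setTrue v here) (by omega)

theorem sim_all (t : Int) (g : List (List Int)) : ∀ fuel, SA t g fuel ∧ SL t g fuel := by
  intro fuel
  induction fuel with
  | zero => exact ⟨sa_zero t g, sl_of_sa t g 0 (sa_zero t g)⟩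
  | succ f ih =>
    have hsa := sa_succ t g f ih.2
    exact ⟨hsa, sl_of_sa t g (f + 1) hsa⟩

-- ===== VERDICT (by name: the statement is the Claim_ definition above) =====
theorem dfs_spec : Claim_equal_dfs := by
  intro here depth target graph visited _ _
  unfold Spec_dfs dfs dfs_alt
  rw [dfsAux]
  by_cases ht : here = target
  · simp [ht]
  · simp only [ht, if_false]
    have hcount : (setTrue visited here).count false ≤ visited.length := by
      have := List.count_le_length (l := setTrue visited here) (a := false)
      rw [length_setTrue] at this
      exact this
    rcases (sim_all target graph visited.length).2 (rowOf graph here) depth []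
        (setTrue visited here) hcount with ⟨hp, hB⟩ | ⟨hp, hB⟩ | ⟨hp, _, hB⟩
    · rw [List.append_nil] at hB
      rw [hB]
    · rw [List.append_nil] at hB
      rw [hB, hp]
      simp [dfsAltLoop]
    · rw [List.append_nil] at hB
      rw [hB, hp]
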